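-- pv_equiv track=rewrite | github.com/vxqzn/data-foundations | python/coachpy/stage1.py | count_unique_entries
-- ===== SOURCE A (Python) =====
-- def count_unique_entries(entry_list):
--     i = 0
--     unique_foods = set()
--     while i < len(entry_list):
--         current_item = entry_list[i]
--         if current_item == "STOP":
--             break
--         unique_foods.add(current_item)
--         i += 1
--     return len(unique_foods)
-- ===== SOURCE B (Python) =====
-- def count_unique_entries(entry_list):
--     items = []
--     for entry in entry_list:
--         if entry == "STOP":
--             break
--         items.append(entry)
--     items.sort()
--     distinct = 0
--     prev = None
--     for item in items:
--         if prev != item: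
--             distinct += 1
--         prev = item
--     return distinct
-- ===== Notes on version B (the rewrite author's own statement) =====
-- stated objective: alternative
-- what changed: Replaces A's hash-set accumulation with sort-based distinct counting: collect the prefix before 'STOP', sort it, and count positions where an item differs from its predecessor (equal items become adjacent after sorting).
import Mathlib
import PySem

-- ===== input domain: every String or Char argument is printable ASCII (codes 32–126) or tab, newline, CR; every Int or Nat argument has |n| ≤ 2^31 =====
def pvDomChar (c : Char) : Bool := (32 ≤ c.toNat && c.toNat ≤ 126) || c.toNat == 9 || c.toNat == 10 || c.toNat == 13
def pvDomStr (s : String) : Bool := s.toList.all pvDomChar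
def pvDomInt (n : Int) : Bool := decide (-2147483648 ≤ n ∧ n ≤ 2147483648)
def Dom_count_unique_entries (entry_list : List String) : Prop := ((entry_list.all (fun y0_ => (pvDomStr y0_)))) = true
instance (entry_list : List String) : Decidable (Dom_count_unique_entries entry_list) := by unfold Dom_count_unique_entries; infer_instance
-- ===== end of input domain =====

-- B replaces A's hash-set accumulation with sort-based distinct counting (prefix before "STOP", sort, count adjacent changes); alternative algorithm, same result.


-- ===== PORT A =====
-- A's while loop, consuming the remaining suffix entry_list[i:] with the set accumulator
def count_unique_entries_go (rest : List String) (unique_foods : PySem.Set String) : PySem.Set String :=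
  match rest with
  | [] => unique_foods
  | current_item :: rest' =>
    if current_item == "STOP" then unique_foods
    else count_unique_entries_go rest' (PySem.Set.add unique_foods current_item)

def count_unique_entries (entry_list : List String) : Int :=
  ((count_unique_entries_go entry_list PySem.Set.empty).length : Int)

-- ===== PORT B =====
-- B's first loop: collect entries until "STOP" (items.append with break)
def cue_items (entry_list : List String) : List String :=
  match entry_list with
  | [] => []
  | entry :: rest => if entry == "STOP" then [] else entry :: cue_items rest

-- B's second loop: prev starts at None; count items that differ from prev
def cue_scan (prev : Option String) (distinct : Int) (items : List String) : Int :=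
  match items with
  | [] => distinct
  | item :: rest => cue_scan (some item) (if prev ≠ some item then distinct + 1 else distinct) rest

def count_unique_entries_alt (entry_list : List String) : Int :=
  let items := PySem.List.sorted (cue_items entry_list) (fun x => x) false
  cue_scan none 0 items

-- ===== PRECONDITION & SPEC =====
def Spec_count_unique_entries (entry_list : List String) (out : Int) : Prop := out = count_unique_entries_alt entry_list
instance (entry_list : List String) (out : Int) : Decidable (Spec_count_unique_entries entry_list out) := by unfold Spec_count_unique_entries; infer_instance

-- ===== CLAIM =====
def Claim_equal_count_unique_entries : Prop := ∀ (entry_list : List String), Dom_count_unique_entries entry_list → Spec_count_unique_entries entry_list (count_unique_entries entry_list)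

-- ===== LEMMAS AND PROOFS =====

-- A's loop is a fold of Set.add over the prefix before the first "STOP"
theorem count_unique_entries_go_eq (l : List String) (s : PySem.Set String) :
    count_unique_entries_go l s = (l.takeWhile (fun x => x != "STOP")).foldl PySem.Set.add s := by
  induction l generalizing s with
  | nil => rfl
  | cons x xs ih =>
    by_cases h : x = "STOP"
    · subst h; simp [count_unique_entries_go, List.takeWhile]
    · have hb : (x != "STOP") = true := by simp [h]
      simp [count_unique_entries_go, List.takeWhile, h, hb, ih]

theorem cue_items_eq (l : List String) :
    cue_items l = l.takeWhile (fun x => x != "STOP") := by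
  induction l with
  | nil => rfl
  | cons x xs ih =>
    by_cases h : x = "STOP"
    · subst h; simp [cue_items, List.takeWhile]
    · have hb : (x != "STOP") = true := by simp [h]
      simp [cue_items, List.takeWhile, h, hb, ih]

-- counting step: card of (insert x t) as one more than card of (t.erase x)
theorem card_insert_erase (x : String) (t : Finset String) :
    ((insert x t).card : Int) = ((t.erase x).card : Int) + 1 := by
  by_cases hx : x ∈ t
  · rw [Finset.insert_eq_self.mpr hx]
    have := Finset.card_erase_add_one hx
    omega
  · rw [Finset.card_insert_of_notMem hx, Finset.erase_eq_of_notMem hx]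
    push_cast; ring

-- the scan over a sorted tail, with prev = some a a lower bound of the tail
theorem cue_scan_some (ys : List String) (h : ys.Pairwise (· ≤ ·)) :
    ∀ (a : String), (∀ b ∈ ys, a ≤ b) → ∀ (d : Int),
      cue_scan (some a) d ys = d + ((ys.toFinset.erase a).card : Int) := by
  induction ys with
  | nil => intro a _ d; simp [cue_scan]
  | cons x xs ih =>
    intro a ha d
    have hx : ∀ b ∈ xs, x ≤ b := by
      intro b hb; exact (List.pairwise_cons.mp h).1 b hb
    have hxs : xs.Pairwise (· ≤ ·) := (List.pairwise_cons.mp h).2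
    by_cases hax : a = x
    · subst hax
      simp only [cue_scan]
      rw [if_neg (by simp : ¬(some a ≠ some a)), ih hxs a hx d]
      simp [Finset.erase_insert_eq_erase]
    · have hcond : (some a ≠ some x) := by simpa using hax
      simp only [cue_scan, if_pos hcond]
      rw [ih hxs x hx (d + 1)]
      have hanotin : a ∉ insert x xs.toFinset := by
        intro hmem
        rcases Finset.mem_insert.mp hmem with h1 | h2
        · exact hax h1
        · exact hax (le_antisymm (ha x (by simp)) (hx a (List.mem_toFinset.mp h2)))
      rw [List.toFinset_cons, Finset.erase_eq_of_notMem hanotin, card_insert_erase]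
      ring

theorem cue_scan_none (ys : List String) (h : ys.Pairwise (· ≤ ·)) :
    cue_scan none 0 ys = ((ys.toFinset.card : Int)) := by
  cases ys with
  | nil => simp [cue_scan]
  | cons x xs =>
    have hx : ∀ b ∈ xs, x ≤ b := by
      intro b hb; exact (List.pairwise_cons.mp h).1 b hb
    have hxs : xs.Pairwise (· ≤ ·) := (List.pairwise_cons.mp h).2
    simp only [cue_scan]
    rw [if_pos (by simp : (none : Option String) ≠ some x)]
    rw [cue_scan_some xs hxs x hx (0 + 1)]
    rw [List.toFinset_cons, card_insert_erase]
    ring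

-- A's set length is the toFinset card of the prefix
theorem set_ofList_length (p : List String) :
    ((PySem.Set.ofList p).length : Int) = (p.toFinset.card : Int) := by
  have hnd : (PySem.Set.ofList p).Nodup := PySem.Set.nodup_ofList p
  have hfs : (PySem.Set.ofList p).toFinset = p.toFinset := by
    ext x
    simp [List.mem_toFinset, PySem.Set.mem_ofList]
  rw [← hfs, List.toFinset_card_of_nodup hnd]

theorem count_unique_entries_eq (l : List String) :
    count_unique_entries l = count_unique_entries_alt l := by
  unfold count_unique_entries count_unique_entries_alt
  rw [count_unique_entries_go_eq, cue_items_eq]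
  set p := l.takeWhile (fun x => x != "STOP") with hp
  have hpair : (PySem.List.sorted p (fun x => x) false).Pairwise (· ≤ ·) := by
    simpa using PySem.List.sorted_pairwise p (fun x => x)
  rw [cue_scan_none _ hpair]
  have hperm : (PySem.List.sorted p (fun x => x) false).Perm p := PySem.List.sorted_perm p (fun x => x) false
  rw [List.toFinset_eq_of_perm _ _ hperm]
  rw [← set_ofList_length]
  simp [PySem.Set.ofList_eq_foldl, PySem.Set.empty]

-- ===== VERDICT =====
theorem count_unique_entries_spec : Claim_equal_count_unique_entries := by
  intro l _
  unfold Spec_count_unique_entries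
  exact count_unique_entries_eq l
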